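-- pv_equiv track=rewrite | github.com/prashant96pm/Intro_to_python | Recursion/Pair_Star.py | PairStar
-- ===== SOURCE A (Python) =====
-- def PairStar(s,si):
--     l = len(s)
--     if si == l or si == l-1:
--         return s[si]
--
--     if s[si] == s[si+1]:
--         return s[si]+ "*" + PairStar(s,si+1)
--     else:
--         return s[si] + PairStar(s,si+1)
-- ===== SOURCE B (Python) =====
-- def PairStar(s, si):
--     l = len(s)
--     if si >= l - 1:
--         return s[si]
--     out = []
--     for i in range(si, l - 1):
--         out.append(s[i])
--         if s[i] == s[i + 1]:
--             out.append('*')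
--     out.append(s[l - 1])
--     return ''.join(out)
-- ===== Notes on version B (the rewrite author's own statement) =====
-- stated objective: faster
-- what changed: Replaces the recursion (which builds the result by repeated string concatenation, quadratic in CPython) with one iterative pass that appends pieces to a list and joins once.
import Mathlib
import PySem

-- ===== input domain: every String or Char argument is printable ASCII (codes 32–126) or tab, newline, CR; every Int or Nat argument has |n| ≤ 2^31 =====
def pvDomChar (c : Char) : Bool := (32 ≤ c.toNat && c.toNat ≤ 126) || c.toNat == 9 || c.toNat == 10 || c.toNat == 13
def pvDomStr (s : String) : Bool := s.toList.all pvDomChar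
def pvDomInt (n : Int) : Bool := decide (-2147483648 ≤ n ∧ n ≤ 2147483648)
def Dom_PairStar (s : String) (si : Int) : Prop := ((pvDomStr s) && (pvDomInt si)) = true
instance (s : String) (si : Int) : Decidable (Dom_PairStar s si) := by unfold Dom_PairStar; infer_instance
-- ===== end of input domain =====

-- B replaces A's recursion (repeated string concatenation) by one iterative pass that
-- collects pieces in a list and joins once (objective: faster).

-- ===== PORT A =====
-- A's recursion, on the code-point list (PairStar wraps it; Python raise = the none branches).
def pairStarARec (cs : List Char) (si : Int) : List Char :=
  let l : Int := cs.length
  if si = l ∨ si = l - 1 then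
    match PySem.List.pyGet? cs si with
    | some c => [c]
    | none   => []            -- IndexError in Python: excluded by Pre_
  else
    match _h1 : PySem.List.pyGet? cs si, _h2 : PySem.List.pyGet? cs (si + 1) with
    | some c, some d =>
        if c = d then c :: '*' :: pairStarARec cs (si + 1)
        else c :: pairStarARec cs (si + 1)
    | _, _ => []              -- IndexError in Python: excluded by Pre_
termination_by ((cs.length : Int) - si).toNat
decreasing_by
  all_goals
    have hin : PySem.Raise.InRange cs.length (si + 1) := by
      by_contra hc
      rw [← PySem.List.pyGet?_eq_none_iff (xs := cs) (i := si + 1)] at hc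
      simp [hc] at _h2
    unfold PySem.Raise.InRange at hin
    omega

def PairStar (s : String) (si : Int) : String :=
  String.ofList (pairStarARec s.toList si)

-- ===== PORT B =====
-- B's loop body: append s[i], and '*' when s[i] == s[i+1]  (pyGetD is total; Pre_ keeps i in range).
def pairStarBStep (cs : List Char) (acc : List Char) (i : Int) : List Char :=
  let acc := acc ++ [PySem.List.pyGetD cs i ' ']
  if PySem.List.pyGetD cs i ' ' = PySem.List.pyGetD cs (i + 1) ' ' then acc ++ ['*'] else acc

def pairStarB (cs : List Char) (si : Int) : List Char :=
  let l : Int := cs.length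
  if si ≥ l - 1 then
    match PySem.List.pyGet? cs si with
    | some c => [c]
    | none   => []            -- IndexError in Python: excluded by Pre_
  else
    let out := (PySem.List.pyRange si (l - 1) 1).foldl (pairStarBStep cs) []
    out ++ [PySem.List.pyGetD cs (l - 1) ' ']

def PairStar_alt (s : String) (si : Int) : String :=
  String.ofList (pairStarB s.toList si)

-- ===== PRECONDITION & SPEC =====
-- Exactly the inputs on which the Python A returns (otherwise it raises IndexError).
def Pre_PairStar (s : String) (si : Int) : Prop :=
  -(s.toList.length : Int) ≤ si ∧ si < (s.toList.length : Int)
instance (s : String) (si : Int) : Decidable (Pre_PairStar s si) := by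
  unfold Pre_PairStar; infer_instance

def pvWitness_PairStar : String × Int := ("aabba", 0)

def Spec_PairStar (s : String) (si : Int) (out : String) : Prop := out = PairStar_alt s si
instance (s : String) (si : Int) (out : String) : Decidable (Spec_PairStar s si out) := by
  unfold Spec_PairStar; infer_instance

-- ===== CLAIM (what is proved, stated in full; the proofs are below) =====
def Claim_equal_PairStar : Prop :=
  ∀ (s : String) (si : Int), Dom_PairStar s si → Pre_PairStar s si →
    Spec_PairStar s si (PairStar s si)

-- ===== LEMMAS AND PROOFS =====

-- the piece B emits for index i
def pairStarPiece (cs : List Char) (i : Int) : List Char :=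
  if PySem.List.pyGetD cs i ' ' = PySem.List.pyGetD cs (i + 1) ' '
  then [PySem.List.pyGetD cs i ' ', '*'] else [PySem.List.pyGetD cs i ' ']

lemma pairStarBStep_eq_append (cs : List Char) (acc : List Char) (i : Int) :
    pairStarBStep cs acc i = acc ++ pairStarPiece cs i := by
  unfold pairStarBStep pairStarPiece
  split <;> simp

lemma pairStarB_eq_flatMap (cs : List Char) (si : Int) (h : si < (cs.length : Int) - 1) :
    pairStarB cs si =
      (PySem.List.pyRange si ((cs.length : Int) - 1) 1).flatMap (pairStarPiece cs)
        ++ [PySem.List.pyGetD cs ((cs.length : Int) - 1) ' '] := by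
  unfold pairStarB
  rw [if_neg (by omega)]
  have hstep : pairStarBStep cs = fun acc i => acc ++ pairStarPiece cs i := by
    funext acc i; exact pairStarBStep_eq_append cs acc i
  rw [hstep, PySem.List.foldl_append_eq_flatMap]
  simp

lemma pyGet?_eq_some_pyGetD (cs : List Char) (i : Int)
    (h1 : -(cs.length : Int) ≤ i) (h2 : i < (cs.length : Int)) :
    PySem.List.pyGet? cs i = some (PySem.List.pyGetD cs i ' ') := by
  rcases (by omega : 0 ≤ i ∨ i < 0) with hi | hi
  · rw [PySem.List.pyGet?_of_nonneg (xs := cs) hi, PySem.List.pyGetD_eq_getElem (xs := cs) (d := ' ') hi h2]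
    exact List.getElem?_eq_getElem (by omega)
  · have hk : 0 < (-i).toNat ∧ (-i).toNat ≤ cs.length := by omega
    have hi' : i = -((-i).toNat : Int) := by omega
    rw [hi', PySem.List.pyGet?_neg_natCast (xs := cs) (k := (-i).toNat) hk.1 hk.2,
        PySem.List.pyGetD_neg_natCast (xs := cs) (k := (-i).toNat) ' ' hk.1 hk.2]
    exact List.getElem?_eq_getElem (by omega)

lemma pairStarARec_eq_flatMap (cs : List Char) (si : Int)
    (h1 : -(cs.length : Int) ≤ si) (h2 : si < (cs.length : Int)) :
    pairStarARec cs si =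
      (PySem.List.pyRange si ((cs.length : Int) - 1) 1).flatMap (pairStarPiece cs)
        ++ [PySem.List.pyGetD cs ((cs.length : Int) - 1) ' '] := by
  by_cases hlast : si = (cs.length : Int) - 1
  · unfold pairStarARec
    rw [if_pos (Or.inr hlast)]
    rw [pyGet?_eq_some_pyGetD cs si h1 h2]
    rw [hlast, PySem.List.pyRange_one_eq_nil (by omega)]
    simp
  · have hlt : si < (cs.length : Int) - 1 := by omega
    unfold pairStarARec
    rw [if_neg (by omega)]
    have hc := pyGet?_eq_some_pyGetD cs si h1 h2
    have hd := pyGet?_eq_some_pyGetD cs (si + 1) (by omega) (by omega)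
    have ih := pairStarARec_eq_flatMap cs (si + 1) (by omega) (by omega)
    rw [PySem.List.pyRange_one_cons (by omega), List.flatMap_cons, hc, hd]
    split
    · rename_i c d hc' hd'
      injection hc' with hc'
      injection hd' with hd'
      subst hc'
      subst hd'
      rw [ih]
      unfold pairStarPiece
      split_ifs <;> simp
    · rename_i hf
      exact (hf _ _ rfl rfl).elim
termination_by ((cs.length : Int) - si).toNat
decreasing_by omega

lemma pairStar_lists_eq (cs : List Char) (si : Int)
    (h1 : -(cs.length : Int) ≤ si) (h2 : si < (cs.length : Int)) :
    pairStarARec cs si = pairStarB cs si := by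
  by_cases hlast : (cs.length : Int) - 1 ≤ si
  · have hsi : si = (cs.length : Int) - 1 := by omega
    unfold pairStarARec pairStarB
    rw [if_pos (Or.inr hsi), if_pos (by omega)]
  · rw [pairStarARec_eq_flatMap cs si h1 h2, pairStarB_eq_flatMap cs si (by omega)]

-- ===== VERDICT (by name: the statement is the Claim_ definition above) =====
theorem PairStar_spec : Claim_equal_PairStar := by
  intro s si _hdom hpre
  unfold Spec_PairStar PairStar PairStar_alt
  rw [pairStar_lists_eq s.toList si hpre.1 hpre.2]
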